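-- pv_equiv track=rewrite | github.com/botrosmark/podflow | src/podflow/email/builder.py | _diverse_select
-- ===== SOURCE A (Python) =====
-- MAX_PER_SECTION = 7
--
-- MAX_PER_PODCAST = 2
--
-- def _diverse_select(items: list[dict], key: str = "source_podcast",
--                     limit: int = MAX_PER_SECTION,
--                     per_source: int = MAX_PER_PODCAST) -> list[dict]:
--     """Select items with diversity — no single source dominates.
--
--     Round-robin: pick the best item from each source first,
--     then come back for seconds, up to per_source cap.
--     """
--     if not items:
--         return []
--
--     # Group by source
--     by_source: dict[str, list[dict]] = {}
--     for item in items: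
--         src = item.get(key, "unknown")
--         by_source.setdefault(src, []).append(item)
--
--     # Round-robin selection
--     selected = []
--     for round_num in range(per_source):
--         for src, src_items in by_source.items():
--             if round_num < len(src_items) and len(selected) < limit:
--                 selected.append(src_items[round_num])
--
--     return selected[:limit]
-- ===== SOURCE B (Python) =====
-- MAX_PER_SECTION = 7
--
-- MAX_PER_PODCAST = 2
--
-- def _diverse_select(items, key="source_podcast",
--                     limit=MAX_PER_SECTION,
--                     per_source=MAX_PER_PODCAST):
--     """Rank-and-sort reformulation: give every candidate a global round-robin
--     rank (round * number_of_sources + source_index) and sort once by it."""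
--     groups = {}
--     for item in items:
--         groups.setdefault(item.get(key, "unknown"), []).append(item)
--     n = len(groups)
--     cap = max(per_source, 0)
--     ranked = []
--     for j, grp in enumerate(groups.values()):
--         for r, item in enumerate(grp[:cap]):
--             ranked.append((r * n + j, item))
--     ranked.sort(key=lambda t: t[0])
--     return [item for _, item in ranked[:max(limit, 0)]]
-- ===== Notes on version B (the rewrite author's own statement) =====
-- stated objective: alternative
-- what changed: Replaces A's round-robin double loop (per_source passes over the groups dict with an in-loop limit check) by ranking every capped candidate with a single integer key (round * number_of_sources + source_index), sorting once by that key and slicing the prefix.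
import Mathlib
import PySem

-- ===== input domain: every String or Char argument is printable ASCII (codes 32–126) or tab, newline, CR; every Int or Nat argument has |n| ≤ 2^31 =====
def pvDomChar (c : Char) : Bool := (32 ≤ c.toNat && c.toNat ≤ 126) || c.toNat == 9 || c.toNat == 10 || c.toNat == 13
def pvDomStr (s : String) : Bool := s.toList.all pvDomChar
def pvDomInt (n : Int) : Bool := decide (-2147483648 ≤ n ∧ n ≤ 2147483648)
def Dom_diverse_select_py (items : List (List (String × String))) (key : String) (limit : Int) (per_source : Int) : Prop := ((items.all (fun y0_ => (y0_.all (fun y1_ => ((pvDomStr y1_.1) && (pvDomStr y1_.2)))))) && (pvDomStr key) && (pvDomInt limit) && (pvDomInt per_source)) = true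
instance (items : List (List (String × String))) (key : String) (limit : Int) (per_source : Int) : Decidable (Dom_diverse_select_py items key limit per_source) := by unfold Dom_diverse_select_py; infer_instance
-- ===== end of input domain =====

-- B replaces A's bounded round-robin double loop by ranking every capped candidate with a
-- single integer (round * number_of_sources + source_index) and sorting once (objective: alternative).

-- ===== PORT A =====
def diverse_select_py (items : List (List (String × String))) (key : String) (limit : Int) (per_source : Int) : List (List (String × String)) :=
  if items = [] then []
  else
    let by_source : PySem.Dict String (List (List (String × String))) :=
      items.foldl (fun d item => d.modify ((PySem.Dict.mk item).getD key "unknown") [] (fun l => l ++ [item])) PySem.Dict.empty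
    let selected : List (List (String × String)) :=
      (PySem.List.pyRange 0 per_source 1).foldl (fun sel r =>
        by_source.items.foldl (fun sel p =>
          if r < (p.2.length : Int) ∧ (sel.length : Int) < limit then sel ++ [PySem.List.pyGetD p.2 r []] else sel) sel) []
    PySem.List.slice selected none (some limit)

-- ===== PORT B =====
def diverse_select_py_alt (items : List (List (String × String))) (key : String) (limit : Int) (per_source : Int) : List (List (String × String)) :=
  let groups : PySem.Dict String (List (List (String × String))) :=
    items.foldl (fun d item => d.modify ((PySem.Dict.mk item).getD key "unknown") [] (fun l => l ++ [item])) PySem.Dict.empty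
  let n : Int := groups.size
  let cap : Int := max per_source 0
  let ranked : List (Int × List (String × String)) :=
    (PySem.List.enumerate groups.values 0).foldl (fun acc jg =>
      (PySem.List.enumerate (PySem.List.slice jg.2 none (some cap)) 0).foldl
        (fun acc ri => acc ++ [(ri.1 * n + jg.1, ri.2)]) acc) []
  let ranked2 := PySem.List.sorted ranked (fun t => t.1) false
  (PySem.List.slice ranked2 none (some (max limit 0))).map (fun t => t.2)

-- ===== PRECONDITION & SPEC =====
def Spec_diverse_select_py (items : List (List (String × String))) (key : String) (limit : Int) (per_source : Int) (out : List (List (String × String))) : Prop := out = diverse_select_py_alt items key limit per_source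
instance (items : List (List (String × String))) (key : String) (limit : Int) (per_source : Int) (out : List (List (String × String))) : Decidable (Spec_diverse_select_py items key limit per_source out) := by unfold Spec_diverse_select_py; infer_instance

-- ===== CLAIM (what is proved, stated in full; the proofs are below) =====
def Claim_equal_diverse_select_py : Prop := ∀ (items : List (List (String × String))) (key : String) (limit : Int) (per_source : Int), Dom_diverse_select_py items key limit per_source → Spec_diverse_select_py items key limit per_source (diverse_select_py items key limit per_source)

-- ===== LEMMAS AND PROOFS =====

-- Both ports build the very same groups dict; everything afterwards depends only on its
-- items list `ps` (A iterates `.items`, B iterates `.values` with `n = size`), so the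
-- equivalence is proved parametrically in `ps`: `coreA ps = coreB ps` (A's capped
-- round-robin double loop = B's rank-and-stable-sort pass, both = `take limit` of the
-- flattened round-robin list `rrList`).

def coreA (ps : List (String × List (List (String × String)))) (limit per_source : Int) : List (List (String × String)) :=
  PySem.List.slice
    ((PySem.List.pyRange 0 per_source 1).foldl (fun sel r =>
      ps.foldl (fun sel p =>
        if r < (p.2.length : Int) ∧ (sel.length : Int) < limit then sel ++ [PySem.List.pyGetD p.2 r []] else sel) sel) [])
    none (some limit)

def coreB (ps : List (String × List (List (String × String)))) (limit per_source : Int) : List (List (String × String)) :=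
  (PySem.List.slice
    (PySem.List.sorted
      ((PySem.List.enumerate (ps.map (·.2)) 0).foldl (fun acc jg =>
        (PySem.List.enumerate (PySem.List.slice jg.2 none (some (max per_source 0))) 0).foldl
          (fun acc ri => acc ++ [(ri.1 * (ps.length : Int) + jg.1, ri.2)]) acc) [])
      (fun t => t.1) false)
    none (some (max limit 0))).map (fun t => t.2)

theorem slice_nil {α : Type} (a b : Option Int) : PySem.List.slice ([] : List α) a b = [] := by
  cases h : PySem.List.slice ([] : List α) a b with
  | nil => rfl
  | cons x t =>
    have hx : x ∈ PySem.List.slice ([] : List α) a b := by rw [h]; exact List.mem_cons_self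
    simpa using PySem.List.mem_of_mem_slice [] a b hx

-- capped append fold = take of the unbounded filtered map
theorem capfold {γ β : Type} (C : γ → Prop) [DecidablePred C] (f : γ → β) (limit : Int)
    (l : List γ) (sel : List β) :
    l.foldl (fun sel p => if C p ∧ (sel.length : Int) < limit then sel ++ [f p] else sel) sel
      = sel ++ ((l.filter (fun p => decide (C p))).map f).take (limit - sel.length).toNat := by
  induction l generalizing sel with
  | nil => simp
  | cons x xs ih =>
    by_cases hC : C x
    · have hx : List.filter (fun p => decide (C p)) (x :: xs) = x :: List.filter (fun p => decide (C p)) xs := by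
        simp [hC]
      by_cases hlen : (sel.length : Int) < limit
      · rw [List.foldl_cons, if_pos ⟨hC, hlen⟩, ih, hx, List.map_cons]
        have h1 : (limit - (sel.length : Int)).toNat = (limit - ((sel ++ [f x]).length : Int)).toNat + 1 := by
          simp only [List.length_append, List.length_cons, List.length_nil]; omega
        rw [h1, List.take_succ_cons, List.append_assoc]
        simp
      · rw [List.foldl_cons, if_neg (by tauto), ih, hx, List.map_cons]
        have h0 : (limit - (sel.length : Int)).toNat = 0 := by omega
        rw [h0]
        simp
    · have hx : List.filter (fun p => decide (C p)) (x :: xs) = List.filter (fun p => decide (C p)) xs := by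
        simp [hC]
      rw [List.foldl_cons, if_neg (by tauto), ih, hx]

-- nested round fold = take of the flattened round-robin list
theorem nestfold {γ β : Type} (C : Int → γ → Prop) [∀ r x, Decidable (C r x)] (f : Int → γ → β)
    (limit : Int) (ps : List γ) (rl : List Int) (sel : List β) :
    rl.foldl (fun sel r => ps.foldl (fun sel p => if C r p ∧ (sel.length : Int) < limit then sel ++ [f r p] else sel) sel) sel
      = sel ++ (rl.flatMap (fun r => (ps.filter (fun p => decide (C r p))).map (f r))).take (limit - sel.length).toNat := by
  induction rl generalizing sel with
  | nil => simp
  | cons r rs ih =>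
    rw [List.foldl_cons, capfold (C r) (f r) limit ps sel, ih]
    rw [List.flatMap_cons, List.take_append, List.append_assoc]
    set A := (ps.filter (fun p => decide (C r p))).map (f r) with hA
    set B := rs.flatMap (fun r => (ps.filter (fun p => decide (C r p))).map (f r)) with hB
    have hX : (limit - (((sel ++ A.take (limit - (sel.length : Int)).toNat)).length : Int)).toNat
        = (limit - (sel.length : Int)).toNat - A.length := by
      simp only [List.length_append, List.length_take]; omega
    rw [hX]

def rrList (ps : List (String × List (List (String × String)))) (per_source : Int) : List (List (String × String)) :=
  (List.range per_source.toNat).flatMap (fun r =>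
    (ps.filter (fun p => decide (r < p.2.length))).map
      (fun p => (p.2[r]?).getD []))

theorem coreA_eq (ps : List (String × List (List (String × String)))) (limit per_source : Int) :
    coreA ps limit per_source = (rrList ps per_source).take limit.toNat := by
  unfold coreA
  rw [nestfold (fun r p => r < (p.2.length : Int)) (fun r p => PySem.List.pyGetD p.2 r []) limit ps]
  simp only [List.nil_append, List.length_nil, Nat.cast_zero, sub_zero]
  rw [PySem.List.pyRange_one, List.flatMap_map]
  have hrr : (List.range (per_source - 0).toNat).flatMap
      (fun (a : Nat) => (ps.filter (fun p => decide ((0 + ((a : Nat) : Int)) < (p.2.length : Int)))).map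
        (fun p => PySem.List.pyGetD p.2 (0 + ((a : Nat) : Int)) [])) = rrList ps per_source := by
    unfold rrList
    rw [show per_source - 0 = per_source from sub_zero per_source]
    congr 1
    funext a
    congr 1
    · funext p
      simp
    · congr 1
      funext p
      simp
  rw [hrr]
  by_cases hl : 0 ≤ limit
  · rw [PySem.List.slice_to _ hl, List.take_take, min_self]
  · have h0 : limit.toNat = 0 := by omega
    rw [h0]
    simp only [List.take_zero]
    exact slice_nil none (some limit)

def gvalF (ps : List (String × List (List (String × String)))) (j : Nat) : List (List (String × String)) :=
  (ps.map (·.2)).getD j []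

def cgF (ps : List (String × List (List (String × String)))) (per_source : Int) (j : Nat) : List (List (String × String)) :=
  (gvalF ps j).take per_source.toNat

def rkF (N r j : Nat) : Int := (r : Int) * (N : Int) + (j : Int)

def entryF (ps : List (String × List (List (String × String)))) (per_source : Int) (rj : Nat × Nat) : Option (Int × List (String × String)) :=
  ((cgF ps per_source rj.2)[rj.1]?).map (fun x => (rkF ps.length rj.1 rj.2, x))

def ysF (ps : List (String × List (List (String × String)))) (per_source : Int) : List (Int × List (String × String)) :=
  (List.range per_source.toNat).flatMap (fun r => (List.range ps.length).filterMap (fun j => entryF ps per_source (r, j)))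

def rankedF (ps : List (String × List (List (String × String)))) (per_source : Int) : List (Int × List (String × String)) :=
  (List.range ps.length).flatMap (fun j => (List.range (cgF ps per_source j).length).map
    (fun r => (rkF ps.length r j, (cgF ps per_source j).getD r [])))

theorem foldl_append_singleton {γ β : Type} (f : γ → β) (l : List γ) (acc : List β) :
    l.foldl (fun acc y => acc ++ [f y]) acc = acc ++ l.map f := by
  rw [PySem.List.foldl_append_eq_flatMap (fun y => [f y]) l acc]
  congr 1
  induction l with
  | nil => rfl
  | cons y ys ih => rw [List.flatMap_cons, List.map_cons, ih]; rfl

theorem ranked_eq (ps : List (String × List (List (String × String)))) (per_source : Int) :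
    ((PySem.List.enumerate (ps.map (·.2)) 0).foldl (fun acc jg =>
        (PySem.List.enumerate (PySem.List.slice jg.2 none (some (max per_source 0))) 0).foldl
          (fun acc ri => acc ++ [(ri.1 * (ps.length : Int) + jg.1, ri.2)]) acc) [])
      = rankedF ps per_source := by
  have hfun : (fun (acc : List (Int × List (String × String))) (jg : Int × List (List (String × String))) =>
      (PySem.List.enumerate (PySem.List.slice jg.2 none (some (max per_source 0))) 0).foldl
        (fun acc ri => acc ++ [(ri.1 * (ps.length : Int) + jg.1, ri.2)]) acc)
      = (fun acc jg => acc ++ (PySem.List.enumerate (PySem.List.slice jg.2 none (some (max per_source 0))) 0).map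
          (fun ri => (ri.1 * (ps.length : Int) + jg.1, ri.2))) := by
    funext acc jg
    exact foldl_append_singleton _ _ acc
  rw [hfun, PySem.List.foldl_append_eq_flatMap, List.nil_append]
  rw [PySem.List.enumerate_eq_map_pyRange (ps.map (·.2)) [], List.flatMap_map]
  have hlen : PySem.List.len (ps.map (·.2)) = ((ps.length : Nat) : Int) := by
    simp [PySem.List.len]
  rw [hlen, PySem.List.pyRange_zero_natCast, List.flatMap_map]
  unfold rankedF
  congr 1
  funext j
  -- fix the group: slice = take cap
  have hcap : (0 : Int) ≤ max per_source 0 := le_max_right _ _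
  rw [PySem.List.slice_to _ hcap]
  have hcap2 : (max per_source 0).toNat = per_source.toNat := by omega
  rw [hcap2]
  have hg : PySem.List.pyGetD (ps.map (·.2)) ((j : Nat) : Int) [] = gvalF ps j := by
    rw [PySem.List.pyGetD_natCast]; rfl
  simp only [hg]
  rw [PySem.List.enumerate_eq_map_pyRange _ [], List.map_map]
  have hlen2 : PySem.List.len ((gvalF ps j).take per_source.toNat) = (((cgF ps per_source j).length : Nat) : Int) := by
    simp [PySem.List.len, cgF]
  rw [hlen2, PySem.List.pyRange_zero_natCast, List.map_map]
  congr 1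
  funext r
  simp only [Function.comp_apply]
  rw [PySem.List.pyGetD_natCast]
  unfold rkF cgF
  rfl

theorem filterMap_eq_map_of_some {γ β : Type} (g : γ → Option β) (h : γ → β) (l : List γ)
    (H : ∀ x ∈ l, g x = some (h x)) : l.filterMap g = l.map h := by
  induction l with
  | nil => rfl
  | cons x xs ih =>
    rw [List.filterMap_cons, H x List.mem_cons_self, List.map_cons,
      ih (fun y hy => H y (List.mem_cons_of_mem x hy))]

theorem rangeFilterMap {β γ : Type} (l : List β) (d : β) (a : Nat) (hle : l.length ≤ a) (e : Nat → β → γ) :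
    (List.range a).filterMap (fun r => (l[r]?).map (e r))
      = (List.range l.length).map (fun r => e r (l.getD r d)) := by
  have ha : a = l.length + (a - l.length) := by omega
  rw [ha, List.range_add, List.filterMap_append]
  have h2 : ((List.range (a - l.length)).map (fun x => l.length + x)).filterMap
      (fun r => (l[r]?).map (e r)) = [] := by
    rw [List.filterMap_map, List.filterMap_eq_nil_iff]
    intro x _
    simp only [Function.comp_apply]
    rw [List.getElem?_eq_none (by omega)]
    rfl
  rw [h2, List.append_nil]
  apply filterMap_eq_map_of_some
  intro r hr
  rw [List.mem_range] at hr
  rw [List.getElem?_eq_getElem hr, List.getD_eq_getElem?_getD, List.getElem?_eq_getElem hr]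
  rfl

def colPairs (N P : Nat) : List (Nat × Nat) := (List.range N).flatMap (fun j => (List.range P).map (fun r => (r, j)))
def rowPairs (N P : Nat) : List (Nat × Nat) := (List.range P).flatMap (fun r => (List.range N).map (fun j => (r, j)))

theorem rowPairs_perm_colPairs (N P : Nat) : (rowPairs N P).Perm (colPairs N P) := by
  have hrow : rowPairs N P = List.product (List.range P) (List.range N) := rfl
  have hcol : colPairs N P = (List.product (List.range N) (List.range P)).map Prod.swap := by
    unfold colPairs
    rw [show List.product (List.range N) (List.range P)
        = (List.range N).flatMap (fun j => (List.range P).map (Prod.mk j)) from rfl, List.map_flatMap]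
    congr 1
    funext j
    rw [List.map_map]
    rfl
  rw [hrow, hcol]
  refine (List.perm_ext_iff_of_nodup ?_ ?_).2 ?_
  · exact List.Nodup.product List.nodup_range List.nodup_range
  · exact (List.Nodup.product List.nodup_range List.nodup_range).map Prod.swap_injective
  · intro x
    rcases x with ⟨r, j⟩
    rw [List.pair_mem_product]
    constructor
    · intro h
      exact List.mem_map.2 ⟨(j, r), List.pair_mem_product.2 ⟨h.2, h.1⟩, rfl⟩
    · intro h
      rcases List.mem_map.1 h with ⟨⟨j', r'⟩, hm, he⟩
      rcases List.pair_mem_product.1 hm with ⟨h1, h2⟩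
      cases he
      exact ⟨h2, h1⟩

theorem ranked_filterMap (ps : List (String × List (List (String × String)))) (per_source : Int) :
    rankedF ps per_source = (colPairs ps.length per_source.toNat).filterMap (entryF ps per_source) := by
  unfold colPairs rankedF
  rw [List.filterMap_flatMap]
  apply List.flatMap_congr
  intro j _
  rw [List.filterMap_map]
  rw [show (entryF ps per_source ∘ fun r => (r, j))
      = (fun r => ((cgF ps per_source j)[r]?).map (fun x => (rkF ps.length r j, x))) from rfl]
  rw [rangeFilterMap (cgF ps per_source j) [] per_source.toNat (by simp [cgF]) (fun r x => (rkF ps.length r j, x))]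

theorem ys_filterMap (ps : List (String × List (List (String × String)))) (per_source : Int) :
    ysF ps per_source = (rowPairs ps.length per_source.toNat).filterMap (entryF ps per_source) := by
  unfold rowPairs ysF
  rw [List.filterMap_flatMap]
  apply List.flatMap_congr
  intro r _
  rw [List.filterMap_map]
  rfl

theorem ys_perm_ranked (ps : List (String × List (List (String × String)))) (per_source : Int) :
    (ysF ps per_source).Perm (rankedF ps per_source) := by
  rw [ys_filterMap, ranked_filterMap]
  exact (rowPairs_perm_colPairs _ _).filterMap _

theorem pairwise_flatMap_bounds {T : Type} (f : Nat → List (Int × T)) (n : Int) (hn : 0 ≤ n)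
    (hord : ∀ r, (f r).Pairwise (fun a b => a.1 < b.1))
    (hbd : ∀ r p, p ∈ f r → ((r : Int)) * n ≤ p.1 ∧ p.1 < ((r : Int) + 1) * n)
    (l : List Nat) (hl : l.Pairwise (· < ·)) :
    (l.flatMap f).Pairwise (fun a b => a.1 < b.1) := by
  induction l with
  | nil => exact List.Pairwise.nil
  | cons a t ih =>
    rw [List.flatMap_cons]
    apply List.pairwise_append.2
    refine ⟨hord a, ih (List.Pairwise.of_cons hl), ?_⟩
    intro p hp q hq
    rcases List.mem_flatMap.1 hq with ⟨b, hb, hqb⟩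
    have hab : a < b := List.rel_of_pairwise_cons hl hb
    have h1 : p.1 < ((a : Int) + 1) * n := (hbd a p hp).2
    have h2 : ((b : Int)) * n ≤ q.1 := (hbd b q hqb).1
    have h3 : ((a : Int) + 1) * n ≤ ((b : Int)) * n := by
      apply mul_le_mul_of_nonneg_right _ hn
      omega
    omega

theorem ys_pairwise (ps : List (String × List (List (String × String)))) (per_source : Int) :
    (ysF ps per_source).Pairwise (fun a b => a.1 < b.1) := by
  unfold ysF
  apply pairwise_flatMap_bounds _ (ps.length : Int) (by positivity)
  · intro r
    apply List.pairwise_filterMap.2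
    apply List.Pairwise.imp _ (List.pairwise_lt_range (n := ps.length))
    intro j j' hjj' b hb b' hb'
    unfold entryF at hb hb'
    rcases Option.map_eq_some_iff.1 hb with ⟨x, _, hx⟩
    rcases Option.map_eq_some_iff.1 hb' with ⟨x', _, hx'⟩
    subst hx hx'
    unfold rkF
    simp only []
    have : (j : Int) < (j' : Int) := by exact_mod_cast hjj'
    omega
  · intro r p hp
    rcases List.mem_filterMap.1 hp with ⟨j, hj, hpj⟩
    unfold entryF at hpj
    rcases Option.map_eq_some_iff.1 hpj with ⟨x, _, hx⟩
    have hjN : j < ps.length := List.mem_range.1 hj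
    subst hx
    unfold rkF
    simp only []
    constructor
    · have : (0 : Int) ≤ (j : Int) := by positivity
      omega
    · have h1 : (j : Int) < (ps.length : Int) := by exact_mod_cast hjN
      have : ((r : Int) + 1) * (ps.length : Int) = (r : Int) * (ps.length : Int) + (ps.length : Int) := by ring
      omega
  · exact List.pairwise_lt_range

theorem sorted_ranked (ps : List (String × List (List (String × String)))) (per_source : Int) :
    PySem.List.sorted (rankedF ps per_source) (fun t => t.1) false = ysF ps per_source :=
  PySem.List.sorted_eq_of_perm_of_pairwise_lt _ _ _ (ys_perm_ranked ps per_source) (ys_pairwise ps per_source)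

theorem coreB_eq (ps : List (String × List (List (String × String)))) (limit per_source : Int) :
    coreB ps limit per_source = ((ysF ps per_source).map (·.2)).take limit.toNat := by
  unfold coreB
  rw [ranked_eq, sorted_ranked, PySem.List.slice_to _ (le_max_right _ _)]
  have h : (max limit 0).toNat = limit.toNat := by omega
  rw [h, List.map_take]

theorem gsFilter (gs : List (List (List (String × String)))) (r : Nat) :
    (List.range gs.length).filterMap (fun j => (gs.getD j [])[r]?)
      = (gs.filter (fun g => decide (r < g.length))).map (fun g => (g[r]?).getD []) := by
  induction gs with
  | nil => rfl
  | cons g gs ih =>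
    rw [List.length_cons, List.range_succ_eq_map, List.filterMap_cons, List.filterMap_map]
    have htail : ((fun j => ((g :: gs).getD j [])[r]?) ∘ Nat.succ) = (fun j => (gs.getD j [])[r]?) := by
      funext j
      simp
    rw [htail, ih, List.getD_cons_zero, List.filter_cons]
    by_cases hg : r < g.length
    · rw [List.getElem?_eq_getElem hg]
      simp [hg]
    · rw [List.getElem?_eq_none (by omega)]
      simp [hg]

theorem ys_map_snd (ps : List (String × List (List (String × String)))) (per_source : Int) :
    (ysF ps per_source).map (·.2) = rrList ps per_source := by
  unfold ysF rrList
  rw [List.map_flatMap]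
  apply List.flatMap_congr
  intro r hr
  have hrP : r < per_source.toNat := List.mem_range.1 hr
  rw [List.map_filterMap]
  have h1 : (fun j => (entryF ps per_source (r, j)).map (·.2))
      = (fun j => (gvalF ps j)[r]?) := by
    funext j
    unfold entryF cgF
    rw [Option.map_map]
    rw [List.getElem?_take, if_pos hrP]
    simp
  rw [h1]
  have h2 : ps.length = (ps.map (·.2)).length := (List.length_map _).symm
  rw [h2]
  rw [show (fun j => (gvalF ps j)[r]?) = (fun j => ((ps.map (·.2)).getD j [])[r]?) from rfl]
  rw [gsFilter (ps.map (·.2)) r, List.filter_map, List.map_map]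
  rfl

theorem core_eq (ps : List (String × List (List (String × String)))) (limit per_source : Int) :
    coreA ps limit per_source = coreB ps limit per_source := by
  rw [coreA_eq, coreB_eq, ys_map_snd]


theorem coreB_nil (limit per_source : Int) : coreB [] limit per_source = [] := by
  simp [coreB, PySem.List.sorted, slice_nil]

theorem ports_eq (items : List (List (String × String))) (key : String) (limit per_source : Int) :
    diverse_select_py items key limit per_source = diverse_select_py_alt items key limit per_source := by
  unfold diverse_select_py diverse_select_py_alt
  by_cases h : items = []
  · subst h
    rw [if_pos rfl]
    exact (coreB_nil limit per_source).symm
  · rw [if_neg h]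
    exact core_eq _ limit per_source

-- ===== VERDICT (by name: the statement is the Claim_ definition above) =====
theorem diverse_select_py_spec : Claim_equal_diverse_select_py := by
  intro items key limit per_source _
  unfold Spec_diverse_select_py
  exact ports_eq items key limit per_source
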